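-- pv_equiv track=rewrite | github.com/brycewestheimer/qdk-pythonic | src/qdk_pythonic/domains/common/mapping.py | _parity_set
-- ===== SOURCE A (Python) =====
-- def _parity_set(j: int) -> set[int]:
--     """Qubits encoding parity of modes 0..j-1.
--
--     In the BK tree, these are the children in the left subtree
--     of j, i.e. the bits we need to XOR to recover occupation
--     parity up to mode j.
--     """
--     result: set[int] = set()
--     if j == 0:
--         return result
--     idx = j - 1
--     while idx >= 0 and idx not in result:
--         result.add(idx)
--         # Move to the "parent" of idx in terms of parity
--         if idx == 0:
--             break
--         # Clear the lowest set bit to traverse the tree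
--         idx = (idx & (idx + 1)) - 1
--         if idx < 0:
--             break
--     return result
-- ===== SOURCE B (Python) =====
-- def _parity_set(j: int) -> set[int]:
--     """Qubits encoding parity of modes 0..j-1, computed directly from j's set bits.
--
--     For each set bit p of j, the parity-set element is the high bits of j
--     (above p) followed by p ones: (j >> (p+1) << (p+1)) + (1 << p) - 1.
--     """
--     result: set[int] = set()
--     if j <= 0:
--         return result
--     p = 0
--     while (j >> p) != 0:
--         if (j >> p) & 1:
--             result.add((j >> (p + 1) << (p + 1)) + (1 << p) - 1)
--         p += 1
--     return result
-- ===== Notes on version B (the rewrite author's own statement) =====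
-- stated objective: alternative
-- what changed: B iterates over the bit positions of j and computes each parity-set element directly from j's binary structure as (j >> (p+1) << (p+1)) + (1 << p) - 1 for every set bit p, instead of A's traversal that starts at j-1 and repeatedly clears trailing one-bits with (idx & (idx+1)) - 1.
import Mathlib
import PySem

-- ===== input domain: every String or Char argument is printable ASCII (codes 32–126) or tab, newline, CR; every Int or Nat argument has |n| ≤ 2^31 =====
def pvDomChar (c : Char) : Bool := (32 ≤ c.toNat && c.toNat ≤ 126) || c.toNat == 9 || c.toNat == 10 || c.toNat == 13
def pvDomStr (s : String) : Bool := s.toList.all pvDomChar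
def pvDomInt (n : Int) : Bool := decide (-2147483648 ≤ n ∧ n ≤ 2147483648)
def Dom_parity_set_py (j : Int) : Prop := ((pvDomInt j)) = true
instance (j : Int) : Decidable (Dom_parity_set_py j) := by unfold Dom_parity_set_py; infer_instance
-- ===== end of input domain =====

-- B computes each parity-set element directly from the set bits of j instead of
-- A's traversal by repeatedly clearing trailing one-bits; a different decomposition
-- of the same Bravyi-Kitaev parity set ("alternative", no speed claim).


-- ===== PORT A =====
-- the while loop of A: condition 'idx >= 0 and idx not in result', body in A's order
def parityLoopA (idx : Int) (result : PySem.Set Int) : PySem.Set Int :=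
  if h : 0 ≤ idx ∧ ¬ (PySem.Set.contains result idx = true) then
    let result' := PySem.Set.add result idx
    if idx = 0 then result'
    else
      let idx' := PySem.Int.band idx (idx + 1) - 1
      if h2 : idx' < 0 then result'
      else parityLoopA idx' result'
  else result
termination_by idx.toNat
decreasing_by
  have hband : PySem.Int.band idx (idx + 1) ≤ idx := by
    have h0 : 0 ≤ idx := h.1
    rw [PySem.Int.band_of_nonneg h0 (by omega)]
    have := Nat.and_le_left (n := idx.toNat) (m := (idx + 1).toNat)
    omega
  omega

def parity_set_py (j : Int) : List Int :=
  if j = 0 then PySem.Set.empty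
  else parityLoopA (j - 1) PySem.Set.empty

-- ===== PORT B =====
-- B's while loop over bit positions p of n = j (exact: after the j ≤ 0 guard j is
-- positive, so Python's >> << & on j are the Nat operations on j.toNat)
def parityLoopB (n : Nat) (p : Nat) (result : PySem.Set Int) : PySem.Set Int :=
  if hz : n >>> p = 0 then result
  else
    let result' := if (n >>> p) &&& 1 = 1 then
        PySem.Set.add result (((n >>> (p+1)) <<< (p+1) + (1 <<< p) - 1 : Nat) : Int)
      else result
    parityLoopB n (p+1) result'
termination_by n >>> p
decreasing_by
  rw [Nat.shiftRight_succ]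
  exact Nat.div_lt_self (Nat.pos_of_ne_zero hz) (by omega)

def parity_set_py_alt (j : Int) : List Int :=
  if j ≤ 0 then PySem.Set.empty
  else parityLoopB j.toNat 0 PySem.Set.empty

-- ===== PRECONDITION & SPEC =====
def Spec_parity_set_py (j : Int) (out : List Int) : Prop := out = parity_set_py_alt j
instance (j : Int) (out : List Int) : Decidable (Spec_parity_set_py j out) := by unfold Spec_parity_set_py; infer_instance

-- ===== CLAIM (what is proved, stated in full; the proofs are below) =====
def Claim_equal_parity_set_py : Prop := ∀ (j : Int), Dom_parity_set_py j → Spec_parity_set_py j (parity_set_py j)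

-- ===== LEMMAS AND PROOFS =====

-- the common value of both programs on a positive argument: the chain obtained by
-- starting at n-1 and repeatedly clearing the lowest set bit of the current n
def pchain (n : Nat) : List Int :=
  if h : n = 0 then [] else ((n : Int) - 1) :: pchain (n &&& (n - 1))
termination_by n
decreasing_by
  have := Nat.and_le_right (n := n) (m := n - 1)
  omega

theorem pchain_zero : pchain 0 = [] := by simp [pchain]

theorem pchain_pos (n : Nat) (h : 0 < n) :
    pchain n = ((n : Int) - 1) :: pchain (n &&& (n - 1)) := by
  rw [pchain]; simp [Nat.pos_iff_ne_zero.mp h]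

theorem and_pred_double (q : Nat) : (2*q+1) &&& (2*q) = 2*q := by
  show Nat.bitwise and (2*q+1) (2*q) = 2*q
  have h := Nat.bitwise_bit (f := and) (a := true) (m := q) (b := false) (n := q)
  have _h2 : Nat.bitwise and q q = q := Nat.and_self q
  simp [Nat.bit] at h
  omega

theorem and_double_double (a b : Nat) : (2*a) &&& (2*b+1) = 2*(a &&& b) := by
  show Nat.bitwise and (2*a) (2*b+1) = 2*(Nat.bitwise and a b)
  have h := Nat.bitwise_bit (f := and) (a := false) (m := a) (b := true) (n := b)
  simp [Nat.bit] at h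
  omega

-- clearing the lowest set bit: n = (2q+1)·2^p gives n &&& (n-1) = q·2^(p+1)
theorem land_pred (p q : Nat) : ((2*q+1) <<< p) &&& ((2*q+1) <<< p - 1) = q <<< (p+1) := by
  induction p generalizing q with
  | zero =>
      simpa [Nat.shiftLeft_eq, Nat.mul_comm] using and_pred_double q
  | succ p ih =>
      have hm : 1 ≤ (2*q+1) <<< p := by
        rw [Nat.shiftLeft_eq]
        have : 0 < (2*q+1) * 2^p := Nat.mul_pos (by omega) (Nat.pow_pos (by omega))
        omega
      have hstep : (2*q+1) <<< (p+1) = 2 * ((2*q+1) <<< p) := Nat.shiftLeft_succ _ _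
      have hpred : (2*q+1) <<< (p+1) - 1 = 2 * ((2*q+1) <<< p - 1) + 1 := by omega
      rw [hpred, hstep, and_double_double, ih,
        show q <<< (p+1+1) = 2 * (q <<< (p+1)) from Nat.shiftLeft_succ _ _]

-- A's loop, started at n-1 with every accumulated element larger than n-1,
-- appends exactly the chain of n
theorem loopA_eq (n : Nat) (s : PySem.Set Int) (hn : 0 < n)
    (hs : ∀ x ∈ s, (n : Int) - 1 < x) :
    parityLoopA ((n : Int) - 1) s = s ++ pchain n := by
  induction n using Nat.strong_induction_on generalizing s with
  | _ n ih =>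
  have hmem : ¬ (PySem.Set.contains s ((n : Int) - 1) = true) := by
    simp only [PySem.Set.contains_iff]
    intro hc
    exact absurd (hs _ hc) (by omega)
  rw [parityLoopA]
  rw [dif_pos ⟨by omega, hmem⟩]
  have hadd : PySem.Set.add s ((n : Int) - 1) = s ++ [(n : Int) - 1] :=
    PySem.Set.add_of_not_mem (by simpa [PySem.Set.contains_iff] using hmem)
  by_cases h1 : n = 1
  · subst h1
    rw [show ((1:Nat) : Int) - 1 = 0 from by norm_num] at hadd ⊢
    rw [if_pos rfl, hadd, pchain_pos 1 (by omega)]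
    norm_num [pchain_zero]
  · rw [if_neg (by omega)]
    set m := n &&& (n - 1) with hmdef
    have hm_le : m ≤ n - 1 := Nat.and_le_right
    have hband : PySem.Int.band ((n : Int) - 1) ((n : Int) - 1 + 1) = (m : Int) := by
      have h' : ((n : Int) - 1) = ((n - 1 : Nat) : Int) := by omega
      rw [h', show ((n - 1 : Nat) : Int) + 1 = ((n : Nat) : Int) from by omega,
        PySem.Int.band_natCast, Nat.and_comm]
    rw [hband]
    by_cases hm0 : m = 0
    · rw [dif_pos (by omega)]
      rw [hadd, pchain_pos n hn, ← hmdef, hm0, pchain_zero]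
    · rw [dif_neg (by omega)]
      have hrec : parityLoopA ((m : Int) - 1) (s ++ [(n : Int) - 1]) =
          (s ++ [(n : Int) - 1]) ++ pchain m := by
        apply ih m (by omega) _ (by omega)
        intro x hx
        rcases List.mem_append.mp hx with hx | hx
        · have := hs x hx; omega
        · simp at hx; omega
      rw [hadd, hrec, pchain_pos n hn, ← hmdef]
      simp

-- B's loop from position p appends exactly the chain of n with its bits below p cleared
theorem loopB_eq (n : Nat) (p : Nat) (s : PySem.Set Int)
    (hs : ∀ x ∈ s, ((n >>> p <<< p : Nat) : Int) ≤ x) :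
    parityLoopB n p s = s ++ pchain (n >>> p <<< p) := by
  induction hk : n >>> p using Nat.strong_induction_on generalizing p s with
  | _ k ih =>
  subst hk
  rw [parityLoopB.eq_def]
  by_cases hz : n >>> p = 0
  · rw [dif_pos hz, hz]
    simp [pchain_zero]
  · rw [dif_neg hz]
    have hhalf : n >>> (p+1) = n >>> p / 2 := Nat.shiftRight_succ _ _
    set q := n >>> (p+1) with hq
    have hp1 : 1 ≤ 1 <<< p := by
      rw [Nat.shiftLeft_eq]
      have := Nat.pow_pos (a := 2) (n := p) (by omega)
      omega
    by_cases hbit : (n >>> p) &&& 1 = 1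
    · -- bit p of n is set: n >>> p = 2q + 1
      have hodd : n >>> p = 2*q + 1 := by
        have := Nat.and_one_is_mod (n >>> p)
        omega
      have hhi : n >>> p <<< p = q <<< (p+1) + 1 <<< p := by
        rw [hodd, Nat.shiftLeft_eq, Nat.shiftLeft_eq, Nat.shiftLeft_eq, Nat.pow_succ]
        ring
      have hnotmem : ((q <<< (p+1) + 1 <<< p - 1 : Nat) : Int) ∉ s := by
        intro hmem
        have hx := hs _ hmem
        rw [hhi] at hx
        generalize hB : q <<< (p+1) = B at hx
        generalize hC : 1 <<< p = C at hx hp1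
        omega
      rw [if_pos hbit]
      have hadd : PySem.Set.add s ((q <<< (p+1) + 1 <<< p - 1 : Nat) : Int) =
          s ++ [((q <<< (p+1) + 1 <<< p - 1 : Nat) : Int)] :=
        PySem.Set.add_of_not_mem hnotmem
      rw [hadd]
      rw [ih q (by omega) (p+1) _ ?_ hq.symm]
      · have hform : n >>> p <<< p = (2*q+1) <<< p := by rw [hodd]
        have hhi2 : (2*q+1) <<< p = q <<< (p+1) + 1 <<< p := by
          rw [← hform, hhi]
        have hpos : 0 < (2*q+1) <<< p := by
          rw [Nat.shiftLeft_eq]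
          exact Nat.mul_pos (by omega) (Nat.pow_pos (by omega))
        rw [hform, pchain_pos _ hpos, land_pred]
        simp only [List.append_assoc, List.singleton_append]
        congr 2
        rw [hhi2]
        generalize q <<< (p+1) = B
        generalize 1 <<< p = C at hp1
        omega
      · intro x hx
        rcases List.mem_append.mp hx with hx | hx
        · have hx' := hs x hx
          rw [hhi] at hx'
          generalize hB : q <<< (p+1) = B at hx' ⊢
          generalize hC : 1 <<< p = C at hx' hp1
          omega
        · simp at hx
          subst hx
          generalize hB : q <<< (p+1) = B
          generalize hC : 1 <<< p = C at hp1
          omega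
    · -- bit p of n is clear: n >>> p = 2q
      have heven : n >>> p = 2*q := by
        have := Nat.and_one_is_mod (n >>> p)
        omega
      have hhi : n >>> p <<< p = q <<< (p+1) := by
        rw [heven, Nat.shiftLeft_eq, Nat.shiftLeft_eq, Nat.pow_succ]
        ring
      rw [if_neg hbit]
      rw [ih q (by omega) (p+1) s (by rw [← hhi]; exact hs) hq.symm, hhi]

-- ===== VERDICT (by name: the statement is the Claim_ definition above) =====
theorem parity_set_py_spec : Claim_equal_parity_set_py := by
  intro j _
  unfold Spec_parity_set_py parity_set_py parity_set_py_alt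
  by_cases hj : j ≤ 0
  · rw [if_pos hj]
    by_cases h0 : j = 0
    · rw [if_pos h0]
    · rw [if_neg h0, parityLoopA]
      rw [dif_neg (by intro hc; omega)]
  · rw [if_neg hj, if_neg (show ¬ j = 0 from by omega)]
    have hn : 0 < j.toNat := by omega
    have hcast : (j.toNat : Int) = j := by omega
    have hA := loopA_eq j.toNat PySem.Set.empty hn
      (by intro x hx; simp [PySem.Set.empty] at hx)
    have hB := loopB_eq j.toNat 0 PySem.Set.empty
      (by intro x hx; simp [PySem.Set.empty] at hx)
    rw [hcast] at hA
    rw [hA, hB]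
    simp
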